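-- pv_equiv track=rewrite | github.com/Tuckers/darktable-pixelpipe | scripts/strip_iop.py | _strip_strings_and_chars
-- ===== SOURCE A (Python) =====
-- def _strip_strings_and_chars(line):
--     """Remove string and char literals so brace counting isn't fooled."""
--     result = []
--     i = 0
--     while i < len(line):
--         ch = line[i]
--         if ch == '"':
--             i += 1
--             while i < len(line):
--                 if line[i] == "\\":
--                     i += 2
--                     continue
--                 if line[i] == '"':
--                     i += 1
--                     break
--                 i += 1
--             continue
--         elif ch == "'":
--             i += 1
--             while i < len(line):
--                 if line[i] == "\\":
--                     i += 2
--                     continue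
--                 if line[i] == "'":
--                     i += 1
--                     break
--                 i += 1
--             continue
--         result.append(ch)
--         i += 1
--     return "".join(result)
-- ===== SOURCE B (Python) =====
-- def _strip_strings_and_chars(line):
--     """Remove string and char literals so brace counting isn't fooled."""
--     out = []
--     state = 0  # 0 = normal, 1 = inside "...", 2 = inside '...'
--     esc = False
--     for ch in line:
--         if state == 0:
--             if ch == '"':
--                 state = 1
--                 esc = False
--             elif ch == "'":
--                 state = 2
--                 esc = False
--             else:
--                 out.append(ch)
--         else:
--             if esc:
--                 esc = False
--             elif ch == "\\":
--                 esc = True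
--             elif (state == 1 and ch == '"') or (state == 2 and ch == "'"):
--                 state = 0
--             # otherwise: drop the char, stay inside the literal
--     return "".join(out)
-- ===== Notes on version B (the rewrite author's own statement) =====
-- stated objective: alternative
-- what changed: Replaced the index-driven outer loop with two duplicated inner skip-loops (and i+=2 escape jumps) by one flat for-loop over the characters driven by a state variable (normal / in-double-quote / in-single-quote) plus an escape flag.
import Mathlib
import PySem

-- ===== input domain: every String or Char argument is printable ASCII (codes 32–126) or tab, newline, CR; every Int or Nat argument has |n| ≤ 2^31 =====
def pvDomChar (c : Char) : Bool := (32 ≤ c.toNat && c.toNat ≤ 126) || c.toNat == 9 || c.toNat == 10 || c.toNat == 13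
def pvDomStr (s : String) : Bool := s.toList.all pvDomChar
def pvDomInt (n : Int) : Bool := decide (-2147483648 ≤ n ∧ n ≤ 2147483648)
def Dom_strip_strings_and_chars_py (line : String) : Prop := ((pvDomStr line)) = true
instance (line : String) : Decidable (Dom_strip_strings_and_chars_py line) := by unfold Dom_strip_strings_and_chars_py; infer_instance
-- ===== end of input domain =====

-- B replaces A's index loop with duplicated inner skip-loops by one flat state-machine pass (same cost, different decomposition).


-- ===== PORT A =====
-- A's inner while loop (for quote character q): skip characters, jumping i+=2 on a
-- backslash, until the matching quote; returns the remainder of the line after the literal.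
def stripInnerA (q : Char) : List Char → List Char
  | [] => []
  | c :: rest =>
    if c == '\\' then stripInnerA q rest.tail   -- i += 2 (past end ⇒ loop ends with empty remainder)
    else if c == q then rest                    -- i += 1; break
    else stripInnerA q rest
termination_by l => l.length
decreasing_by
  · have := List.length_tail (l := rest); simp only [List.length_cons]; omega
  · simp

theorem stripInnerA_length_le (q : Char) (l : List Char) :
    (stripInnerA q l).length ≤ l.length := by
  induction l using stripInnerA.induct q with
  | case1 => simp [stripInnerA]
  | case2 c rest h ih =>
      simp only [stripInnerA, if_pos h, List.length_cons]
      have := List.length_tail (l := rest); omega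
  | case3 c rest h1 h2 => simp [stripInnerA, h1, h2]
  | case4 c rest h1 h2 ih =>
      simp only [stripInnerA, if_neg h1, if_neg h2, List.length_cons]; omega

-- A's outer while loop over i, appending normal characters to result.
def stripOuterA : List Char → List Char
  | [] => []
  | c :: rest =>
    if c == '"' then stripOuterA (stripInnerA '"' rest)
    else if c == '\'' then stripOuterA (stripInnerA '\'' rest)
    else c :: stripOuterA rest
termination_by l => l.length
decreasing_by
  · have := stripInnerA_length_le '"' rest; simp only [List.length_cons]; omega
  · have := stripInnerA_length_le '\'' rest; simp only [List.length_cons]; omega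
  · simp

def strip_strings_and_chars_py (line : String) : String :=
  String.ofList (stripOuterA line.toList)

-- ===== PORT B =====
-- B's single for-loop: state 0 = normal, 1 = inside "…", 2 = inside '…'; esc = escape flag.
def stripGoB (state : Nat) (esc : Bool) : List Char → List Char
  | [] => []
  | c :: rest =>
    if state == 0 then
      if c == '"' then stripGoB 1 false rest
      else if c == '\'' then stripGoB 2 false rest
      else c :: stripGoB 0 false rest
    else
      if esc then stripGoB state false rest
      else if c == '\\' then stripGoB state true rest
      else if (state == 1 && c == '"') || (state == 2 && c == '\'') then stripGoB 0 false rest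
      else stripGoB state false rest

def strip_strings_and_chars_py_alt (line : String) : String :=
  String.ofList (stripGoB 0 false line.toList)

-- ===== PRECONDITION & SPEC =====
def Spec_strip_strings_and_chars_py (line : String) (out : String) : Prop := out = strip_strings_and_chars_py_alt line
instance (line : String) (out : String) : Decidable (Spec_strip_strings_and_chars_py line out) := by unfold Spec_strip_strings_and_chars_py; infer_instance

-- ===== CLAIM (what is proved, stated in full; the proofs are below) =====
def Claim_equal_strip_strings_and_chars_py : Prop := ∀ (line : String), Dom_strip_strings_and_chars_py line → Spec_strip_strings_and_chars_py line (strip_strings_and_chars_py line)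

-- ===== LEMMAS AND PROOFS =====

theorem stripGoB_esc (state : Nat) (l : List Char) :
    stripGoB state true l = stripGoB state false l.tail ∨ (state = 0 ∧ l ≠ []) := by
  cases l with
  | nil => left; rfl
  | cons c rest =>
      by_cases h : state = 0
      · right; exact ⟨h, by simp⟩
      · left; simp [stripGoB, h]

-- combined invariant, by strong induction on the length
theorem stripB_eq_A : ∀ n (l : List Char), l.length ≤ n →
    stripGoB 0 false l = stripOuterA l ∧
    stripGoB 1 false l = stripOuterA (stripInnerA '"' l) ∧
    stripGoB 2 false l = stripOuterA (stripInnerA '\'' l) := by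
  intro n
  induction n with
  | zero =>
      intro l hl
      have : l = [] := List.eq_nil_of_length_eq_zero (by omega)
      subst this
      exact ⟨by simp [stripGoB, stripOuterA], by simp [stripGoB, stripInnerA, stripOuterA], by simp [stripGoB, stripInnerA, stripOuterA]⟩
  | succ n ih =>
      intro l hl
      cases l with
      | nil => exact ⟨by simp [stripGoB, stripOuterA], by simp [stripGoB, stripInnerA, stripOuterA], by simp [stripGoB, stripInnerA, stripOuterA]⟩
      | cons c rest =>
          simp only [List.length_cons] at hl
          have hrest : rest.length ≤ n := by omega
          have htail : rest.tail.length ≤ n := by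
            have := List.length_tail (l := rest); omega
          refine ⟨?_, ?_, ?_⟩
          · -- state 0
            by_cases h1 : c = '"'
            · subst h1
              simp only [stripGoB, stripOuterA]; simp
              exact (ih rest hrest).2.1
            · by_cases h2 : c = '\''
              · subst h2
                simp only [stripGoB, stripOuterA]; simp
                exact (ih rest hrest).2.2
              · simp only [stripGoB, stripOuterA]; simp [h1, h2]
                exact (ih rest hrest).1
          · -- state 1, inside "..."
            by_cases hb : c = '\\'
            · subst hb
              simp only [stripGoB, stripInnerA]; simp
              rcases stripGoB_esc 1 rest with h | h
              · rw [h]; exact (ih rest.tail htail).2.1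
              · exact absurd h.1 (by decide)
            · by_cases hq : c = '"'
              · subst hq
                simp only [stripGoB, stripInnerA]; simp
                exact (ih rest hrest).1
              · simp only [stripGoB, stripInnerA]; simp [hb, hq]
                exact (ih rest hrest).2.1
          · -- state 2, inside '...'
            by_cases hb : c = '\\'
            · subst hb
              simp only [stripGoB, stripInnerA]; simp
              rcases stripGoB_esc 2 rest with h | h
              · rw [h]; exact (ih rest.tail htail).2.2
              · exact absurd h.1 (by decide)
            · by_cases hq : c = '\''
              · subst hq
                simp only [stripGoB, stripInnerA]; simp
                exact (ih rest hrest).1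
              · simp only [stripGoB, stripInnerA]; simp [hb, hq]
                exact (ih rest hrest).2.2

-- ===== VERDICT (by name: the statement is the Claim_ definition above) =====
theorem strip_strings_and_chars_py_spec : Claim_equal_strip_strings_and_chars_py := by
  intro line _
  unfold Spec_strip_strings_and_chars_py strip_strings_and_chars_py strip_strings_and_chars_py_alt
  rw [(stripB_eq_A line.toList.length line.toList le_rfl).1]
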